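-- pv_equiv track=rewrite | github.com/Jie-wzj/fuguo_project | preprocess.py | get_TTM
-- ===== SOURCE A (Python) =====
-- def get_TTM(time):
--     year = time // 10000
--     month = (time % 10000) // 100
--     day = time % 100
--     report_date = [331, 630, 930, 1231]
--     if month < 3 or month == 3 and day != 31:
--         ttm = [(year - 1) * 10000 + report_date[i] for i in range(4)]
--     elif month < 6 or month == 6 and day != 30:
--         ttm = [(year - 1) * 10000 + report_date[i] for i in range(1, 4)] + [year * 10000 + report_date[i] for i in
--                                                                             range(0, 1)]
--     elif month < 9 or month == 9 and day != 30:
--         ttm = [(year - 1) * 10000 + report_date[i] for i in range(2, 4)] + [year * 10000 + report_date[i] for i in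
--                                                                             range(0, 2)]
--     else:
--         ttm = [(year - 1) * 10000 + report_date[i] for i in range(3, 4)] + [year * 10000 + report_date[i] for i in
--                                                                             range(0, 3)]
--     return ttm
-- ===== SOURCE B (Python) =====
-- def get_TTM(time):
--     year, md = divmod(time, 10000)
--     month, day = divmod(md, 100)
--     report_date = [331, 630, 930, 1231]
--     pool = [(year - 1) * 10000 + rd for rd in report_date] + [year * 10000 + rd for rd in report_date]
--     t = ((month > 3 or (month == 3 and day == 31))
--          + (month > 6 or (month == 6 and day == 30))
--          + (month > 9 or (month == 9 and day == 30)))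
--     return pool[t:t + 4]
-- ===== Notes on version B (the rewrite author's own statement) =====
-- stated objective: simpler
-- what changed: Replaces the four-branch explicit slice construction with one flat pool of the two years' report dates and a count of reached quarter-ends used as a slice offset.
import Mathlib
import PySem

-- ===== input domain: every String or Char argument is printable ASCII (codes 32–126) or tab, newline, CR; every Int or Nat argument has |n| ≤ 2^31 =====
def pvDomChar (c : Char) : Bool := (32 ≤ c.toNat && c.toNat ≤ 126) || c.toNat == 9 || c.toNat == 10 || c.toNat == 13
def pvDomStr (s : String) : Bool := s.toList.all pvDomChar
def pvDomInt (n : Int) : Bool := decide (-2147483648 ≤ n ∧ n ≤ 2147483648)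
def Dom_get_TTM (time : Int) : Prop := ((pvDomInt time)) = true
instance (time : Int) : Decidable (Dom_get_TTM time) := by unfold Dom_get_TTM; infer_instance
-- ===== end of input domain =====

-- B replaces A's four-branch slice construction by one flat pool of the eight surrounding report dates indexed by a
-- count of reached quarter-ends (objective: simpler decomposition; same behaviour).

-- ===== PORT A =====
def get_TTM (time : Int) : List Int :=
  let year := PySem.Int.floordiv time 10000
  let month := PySem.Int.floordiv (PySem.Int.mod time 10000) 100
  let day := PySem.Int.mod time 100
  let report_date : List Int := [331, 630, 930, 1231]
  if month < 3 ∨ (month = 3 ∧ day ≠ 31) then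
    (PySem.List.pyRange 0 4 1).map (fun i => (year - 1) * 10000 + PySem.List.pyGetD report_date i 0)
  else if month < 6 ∨ (month = 6 ∧ day ≠ 30) then
    (PySem.List.pyRange 1 4 1).map (fun i => (year - 1) * 10000 + PySem.List.pyGetD report_date i 0)
      ++ (PySem.List.pyRange 0 1 1).map (fun i => year * 10000 + PySem.List.pyGetD report_date i 0)
  else if month < 9 ∨ (month = 9 ∧ day ≠ 30) then
    (PySem.List.pyRange 2 4 1).map (fun i => (year - 1) * 10000 + PySem.List.pyGetD report_date i 0)
      ++ (PySem.List.pyRange 0 2 1).map (fun i => year * 10000 + PySem.List.pyGetD report_date i 0)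
  else
    (PySem.List.pyRange 3 4 1).map (fun i => (year - 1) * 10000 + PySem.List.pyGetD report_date i 0)
      ++ (PySem.List.pyRange 0 3 1).map (fun i => year * 10000 + PySem.List.pyGetD report_date i 0)

-- ===== PORT B =====
def get_TTM_alt (time : Int) : List Int :=
  let year := PySem.Int.floordiv time 10000
  let md := PySem.Int.mod time 10000
  let month := PySem.Int.floordiv md 100
  let day := PySem.Int.mod md 100
  let report_date : List Int := [331, 630, 930, 1231]
  let pool := report_date.map (fun rd => (year - 1) * 10000 + rd)
      ++ report_date.map (fun rd => year * 10000 + rd)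
  let t : Int :=
    (if month > 3 ∨ (month = 3 ∧ day = 31) then 1 else 0)
    + (if month > 6 ∨ (month = 6 ∧ day = 30) then 1 else 0)
    + (if month > 9 ∨ (month = 9 ∧ day = 30) then 1 else 0)
  PySem.List.slice pool (some t) (some (t + 4))

-- ===== PRECONDITION & SPEC =====
def Spec_get_TTM (time : Int) (out : List Int) : Prop := out = get_TTM_alt time
instance (time : Int) (out : List Int) : Decidable (Spec_get_TTM time out) := by unfold Spec_get_TTM; infer_instance

-- ===== CLAIM (what is proved, stated in full; the proofs are below) =====
def Claim_equal_get_TTM : Prop := ∀ (time : Int), Dom_get_TTM time → Spec_get_TTM time (get_TTM time)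

-- ===== LEMMAS AND PROOFS =====

-- month extracted from yyyymmdd is in [0, 100)
theorem month_bounds (time : Int) :
    0 ≤ PySem.Int.floordiv (PySem.Int.mod time 10000) 100 ∧
      PySem.Int.floordiv (PySem.Int.mod time 10000) 100 < 100 := by
  have h1 : 0 ≤ PySem.Int.mod time 10000 := PySem.Int.mod_nonneg time (by norm_num)
  have h2 : PySem.Int.mod time 10000 < 10000 := PySem.Int.mod_lt time (by norm_num)
  constructor
  · rw [PySem.Int.le_floordiv_iff_mul_le (by norm_num : (0:Int) < 100)]; omega
  · rw [PySem.Int.floordiv_lt_iff_lt_mul (by norm_num : (0:Int) < 100)]; omega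

-- the day digits agree whether taken from time % 100 or from (time % 10000) % 100
theorem day_agree (time : Int) :
    PySem.Int.mod (PySem.Int.mod time 10000) 100 = PySem.Int.mod time 100 := by
  have h1 := PySem.Int.floordiv_mul_add_mod time 10000
  have h2 := PySem.Int.floordiv_mul_add_mod (PySem.Int.mod time 10000) 100
  have h3 := PySem.Int.floordiv_mul_add_mod time 100
  have b1 := PySem.Int.mod_nonneg (PySem.Int.mod time 10000) (show (0:Int) < 100 by norm_num)
  have b2 := PySem.Int.mod_lt (PySem.Int.mod time 10000) (show (0:Int) < 100 by norm_num)
  have b3 := PySem.Int.mod_nonneg time (show (0:Int) < 100 by norm_num)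
  have b4 := PySem.Int.mod_lt time (show (0:Int) < 100 by norm_num)
  omega

-- ===== VERDICT (by name: the statement is the Claim_ definition above) =====
theorem get_TTM_spec : Claim_equal_get_TTM := by
  intro time _
  unfold Spec_get_TTM get_TTM get_TTM_alt
  simp only []
  set y := PySem.Int.floordiv time 10000 with hy
  set m := PySem.Int.floordiv (PySem.Int.mod time 10000) 100 with hm
  rw [day_agree time]
  set d := PySem.Int.mod time 100 with hdd
  have hb := month_bounds time
  rw [← hm] at hb
  by_cases h1 : m < 3 ∨ (m = 3 ∧ d ≠ 31)
  · rw [if_pos h1]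
    have ht : ((if m > 3 ∨ (m = 3 ∧ d = 31) then (1:Int) else 0)
        + (if m > 6 ∨ (m = 6 ∧ d = 30) then 1 else 0)
        + (if m > 9 ∨ (m = 9 ∧ d = 30) then 1 else 0)) = 0 := by split_ifs <;> omega
    rw [ht]; rfl
  · rw [if_neg h1]
    by_cases h2 : m < 6 ∨ (m = 6 ∧ d ≠ 30)
    · rw [if_pos h2]
      have ht : ((if m > 3 ∨ (m = 3 ∧ d = 31) then (1:Int) else 0)
          + (if m > 6 ∨ (m = 6 ∧ d = 30) then 1 else 0)
          + (if m > 9 ∨ (m = 9 ∧ d = 30) then 1 else 0)) = 1 := by split_ifs <;> omega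
      rw [ht]; rfl
    · rw [if_neg h2]
      by_cases h3 : m < 9 ∨ (m = 9 ∧ d ≠ 30)
      · rw [if_pos h3]
        have ht : ((if m > 3 ∨ (m = 3 ∧ d = 31) then (1:Int) else 0)
            + (if m > 6 ∨ (m = 6 ∧ d = 30) then 1 else 0)
            + (if m > 9 ∨ (m = 9 ∧ d = 30) then 1 else 0)) = 2 := by split_ifs <;> omega
        rw [ht]; rfl
      · rw [if_neg h3]
        have ht : ((if m > 3 ∨ (m = 3 ∧ d = 31) then (1:Int) else 0)
            + (if m > 6 ∨ (m = 6 ∧ d = 30) then 1 else 0)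
            + (if m > 9 ∨ (m = 9 ∧ d = 30) then 1 else 0)) = 3 := by split_ifs <;> omega
        rw [ht]; rfl
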